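-- pv_equiv track=rewrite | github.com/PlanesLab/ECNumberPrediction | results/MajorityVote/majority_vote.py | extract_top5
-- ===== SOURCE A (Python) =====
-- from typing import Dict, List, Optional, Any
--
-- def extract_top5(prediction: Optional[str]) -> List[str]:
--     """Extract up to 5 EC predictions (flattening groups)."""
--     if not prediction:
--         return []
--     groups = prediction.split(";")
--     top5 = []
--     for grp in groups:
--         top5.extend(x.strip() for x in grp.split("|") if x.strip())
--         if len(top5) >= 5:
--             break
--     return top5[:5]
-- ===== SOURCE B (Python) =====
-- from typing import List, Optional
--
-- def extract_top5(prediction: Optional[str]) -> List[str]: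
--     """Extract up to 5 EC predictions (flattening groups)."""
--     if not prediction:
--         return []
--     tokens, cur = [], []
--     for ch in prediction + ";":
--         if ch in ";|":
--             t = "".join(cur).strip()
--             if t:
--                 tokens.append(t)
--             cur = []
--         else:
--             cur.append(ch)
--     return tokens[:5]
-- ===== Notes on version B (the rewrite author's own statement) =====
-- stated objective: alternative
-- what changed: Replaces A's loop over semicolon-groups with an inner pipe-split pass and an early break by a single left-to-right character scan that cuts tokens at either separator, stripping and collecting them in one flat pass.
import Mathlib
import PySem

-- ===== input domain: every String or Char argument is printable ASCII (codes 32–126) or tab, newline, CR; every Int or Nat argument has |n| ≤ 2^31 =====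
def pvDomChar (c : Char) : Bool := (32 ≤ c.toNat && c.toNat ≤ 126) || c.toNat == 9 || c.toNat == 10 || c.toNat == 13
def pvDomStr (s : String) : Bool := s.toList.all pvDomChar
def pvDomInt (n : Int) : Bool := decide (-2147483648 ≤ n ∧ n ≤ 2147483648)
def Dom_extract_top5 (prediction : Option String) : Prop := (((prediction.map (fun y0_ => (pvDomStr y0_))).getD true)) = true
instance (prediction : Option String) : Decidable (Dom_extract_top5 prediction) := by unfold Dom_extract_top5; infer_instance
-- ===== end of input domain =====

-- B replaces A's nested split-on-';'-then-split-on-'|' loop (with its early break) by a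
-- single left-to-right character scan that cuts tokens at either separator (objective: alternative).

-- ===== PORT A =====
-- loop body: top5.extend(x.strip() for x in grp.split("|") if x.strip()); break when len(top5) >= 5
def extract_top5_loop : List String → List String → List String
  | [], top5 => top5
  | grp :: rest, top5 =>
      let top5' := top5 ++
        (((PySem.Str.split? grp "|").getD []).filter
            (fun x => !(PySem.Str.strip x == ""))).map PySem.Str.strip
      if 5 ≤ top5'.length then top5' else extract_top5_loop rest top5'

def extract_top5 (prediction : Option String) : List String :=
  match prediction with
  | none => []
  | some s =>
      if s = "" then []   -- `if not prediction`
      else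
        PySem.List.slice
          (extract_top5_loop ((PySem.Str.split? s ";").getD []) []) none (some 5)

-- ===== PORT B =====
-- loop body of Source B: on a separator flush the stripped pending chunk, else append the char
-- ("".join(cur) for a list of single characters is exactly String.ofList cur)
def extract_top5_altStep (st : List String × List Char) (ch : Char) :
    List String × List Char :=
  if ch = ';' ∨ ch = '|' then
    let t := PySem.Str.strip (String.ofList st.2)
    (if t = "" then st.1 else st.1 ++ [t], [])
  else (st.1, st.2 ++ [ch])

def extract_top5_alt (prediction : Option String) : List String :=
  match prediction with
  | none => []
  | some s =>
      if s = "" then []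
      else
        PySem.List.slice
          (((s.toList ++ [';']).foldl extract_top5_altStep ([], [])).1) none (some 5)

-- ===== PRECONDITION & SPEC =====
def Spec_extract_top5 (prediction : Option String) (out : List String) : Prop := out = extract_top5_alt prediction
instance (prediction : Option String) (out : List String) : Decidable (Spec_extract_top5 prediction out) := by unfold Spec_extract_top5; infer_instance

-- ===== CLAIM (what is proved, stated in full; the proofs are below) =====
def Claim_equal_extract_top5 : Prop := ∀ (prediction : Option String), Dom_extract_top5 prediction → Spec_extract_top5 prediction (extract_top5 prediction)

-- ===== LEMMAS AND PROOFS =====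

-- simple structural splitter on one character
def sCh (c : Char) : List Char → List (List Char)
  | [] => [[]]
  | a :: t => if a = c then [] :: sCh c t else (sCh c t).modifyHead (a :: ·)

-- splitter on both separators at once
def sB : List Char → List (List Char)
  | [] => [[]]
  | a :: t => if a = ';' ∨ a = '|' then [] :: sB t else (sB t).modifyHead (a :: ·)

-- strip/filter/map pipeline shared by both sides
def toksOf (P : List (List Char)) : List String :=
  ((P.map String.ofList).filter (fun x => !(PySem.Str.strip x == ""))).map PySem.Str.strip

-- the token list B's scan emits from suffix cs with pending chunk cur
def toksC : List Char → List Char → List String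
  | cur, [] => if PySem.Str.strip (String.ofList cur) = "" then [] else [PySem.Str.strip (String.ofList cur)]
  | cur, a :: t =>
      if a = ';' ∨ a = '|' then
        (if PySem.Str.strip (String.ofList cur) = "" then toksC [] t
         else PySem.Str.strip (String.ofList cur) :: toksC [] t)
      else toksC (cur ++ [a]) t

theorem modifyHead_modifyHead {α : Type} (f g : α → α) (l : List α) :
    (l.modifyHead g).modifyHead f = l.modifyHead (fun x => f (g x)) := by
  cases l <;> simp

theorem modifyHead_fun_id {α : Type} (l : List α) :
    l.modifyHead (fun x => x) = l := by
  cases l <;> rfl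

theorem sCh_ne_nil (c : Char) (l : List Char) : sCh c l ≠ [] := by
  cases l with
  | nil => simp [sCh]
  | cons a t =>
      simp only [sCh]
      split
      · simp
      · cases h : sCh c t with
        | nil => exact absurd h (sCh_ne_nil c t)
        | cons x xs => simp [List.modifyHead]

theorem modifyHead_append_of_ne_nil {α : Type} (f : α → α) (l m : List α) (h : l ≠ []) :
    (l ++ m).modifyHead f = l.modifyHead f ++ m := by
  cases l with
  | nil => exact absurd rfl h
  | cons a t => simp

theorem flatMap_map' {α β γ : Type} (f : α → β) (g : β → List γ) (l : List α) :
    (l.map f).flatMap g = l.flatMap (fun x => g (f x)) := by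
  induction l <;> simp_all

-- the fuel-based PySem splitter agrees with sCh for a one-character separator
theorem splitOn_go_single (c : Char) :
    ∀ (fuel : Nat) (l cur : List Char) (acc : List (List Char)), l.length < fuel →
      PySem.Chars.splitOn.go [c] fuel l cur acc
        = acc.reverse ++ (sCh c l).modifyHead (cur.reverse ++ ·) := by
  intro fuel
  induction fuel with
  | zero => intro l cur acc h; omega
  | succ f ih =>
      intro l cur acc h
      cases l with
      | nil =>
          simp [PySem.Chars.splitOn.go, sCh]
      | cons d rest =>
          rw [PySem.Chars.splitOn.go]
          by_cases hc : d = c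
          · subst hc
            have hpre : [d].isPrefixOf (d :: rest) = true := by
              simp [List.isPrefixOf]
            simp only [hpre, if_pos, List.length_cons, List.length_nil, List.length_cons,
              List.drop_succ_cons, List.drop_zero]
            rw [ih rest [] (cur.reverse :: acc) (by simpa using Nat.lt_of_succ_lt_succ h)]
            simp [sCh, List.modifyHead]
            cases sCh d rest <;> rfl
          · have hpre : [c].isPrefixOf (d :: rest) = false := by
              simp [List.isPrefixOf]
              intro hdc; exact hc hdc.symm
            simp only [hpre, Bool.false_eq_true, if_neg, not_false_iff]
            rw [ih rest (d :: cur) acc (by simpa using Nat.lt_of_succ_lt_succ h)]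
            have hs : sCh c (d :: rest) = (sCh c rest).modifyHead (d :: ·) := by
              simp [sCh, hc]
            rw [hs, modifyHead_modifyHead]
            simp

theorem splitOn_single (c : Char) (cs : List Char) :
    PySem.Chars.splitOn cs [c] = sCh c cs := by
  unfold PySem.Chars.splitOn
  rw [splitOn_go_single c (cs.length + 1) cs [] [] (by omega)]
  simp [modifyHead_fun_id]

-- splitting on ';' then on '|' flattens to the two-separator splitter
theorem sB_eq_flatMap (cs : List Char) :
    sB cs = (sCh ';' cs).flatMap (sCh '|') := by
  induction cs with
  | nil => simp [sB, sCh]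
  | cons a t ih =>
      by_cases hsep : a = ';' ∨ a = '|'
      · rcases hsep with h | h
        · subst h
          simp [sB, sCh, ih, List.flatMap_cons]
        · subst h
          have ha : ¬ ('|' = ';') := by decide
          have h1 : sB ('|' :: t) = [] :: sB t := by
            simp [sB]
          cases hh : sCh ';' t with
          | nil => exact absurd hh (sCh_ne_nil ';' t)
          | cons hgrp r =>
              have h2 : sCh ';' ('|' :: t) = ('|' :: hgrp) :: r := by
                simp only [sCh, if_neg ha, hh, List.modifyHead]
              have h3 : sCh '|' ('|' :: hgrp) = [] :: sCh '|' hgrp := by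
                simp [sCh]
              rw [h1, h2, List.flatMap_cons, h3, ih, hh, List.flatMap_cons]
              simp
      · obtain ⟨h1, h2⟩ := not_or.mp hsep
        have hb : sB (a :: t) = (sB t).modifyHead (a :: ·) := by
          simp [sB, h1, h2]
        cases hh : sCh ';' t with
        | nil => exact absurd hh (sCh_ne_nil ';' t)
        | cons hgrp r =>
            have hc : sCh ';' (a :: t) = (a :: hgrp) :: r := by
              simp only [sCh, if_neg h1, hh, List.modifyHead]
            have hd : sCh '|' (a :: hgrp) = (sCh '|' hgrp).modifyHead (a :: ·) := by
              simp [sCh, h2]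
            rw [hb, hc, List.flatMap_cons, hd,
              ← modifyHead_append_of_ne_nil _ _ _ (sCh_ne_nil '|' hgrp)]
            rw [ih, hh, List.flatMap_cons]

theorem toksOf_append (P Q : List (List Char)) :
    toksOf (P ++ Q) = toksOf P ++ toksOf Q := by
  simp [toksOf]

theorem toksOf_flatMap (L : List (List Char)) :
    L.flatMap (fun p => toksOf (sCh '|' p)) = toksOf (L.flatMap (sCh '|')) := by
  induction L with
  | nil => simp [toksOf]
  | cons p r ih => simp [List.flatMap_cons, toksOf_append, ih]

theorem toksOf_cons (p : List Char) (P : List (List Char)) :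
    toksOf (p :: P) =
      (if PySem.Str.strip (String.ofList p) = "" then toksOf P
       else PySem.Str.strip (String.ofList p) :: toksOf P) := by
  by_cases h : PySem.Str.strip (String.ofList p) = "" <;>
    simp [toksOf, h]

-- B's scan tokens = pipeline over sB, with the pending chunk prepended to the first piece
theorem toksC_eq (cs : List Char) :
    ∀ cur, toksC cur cs = toksOf ((sB cs).modifyHead (cur ++ ·)) := by
  induction cs with
  | nil =>
      intro cur
      have h0 : (sB []).modifyHead (fun x => cur ++ x) = [cur] := by
        simp [sB, List.modifyHead]
      rw [h0]
      by_cases h : PySem.Str.strip (String.ofList cur) = "" <;>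
        simp [toksC, toksOf, h]
  | cons a t ih =>
      intro cur
      by_cases hsep : a = ';' ∨ a = '|'
      · have hb : sB (a :: t) = [] :: sB t := by
          simp [sB, hsep]
        have ht : toksC cur (a :: t) =
            (if PySem.Str.strip (String.ofList cur) = "" then toksC [] t
             else PySem.Str.strip (String.ofList cur) :: toksC [] t) := by
          simp [toksC, hsep]
        rw [ht, hb]
        have hm : ([] :: sB t).modifyHead (fun x => cur ++ x) = cur :: sB t := by
          simp [List.modifyHead]
        rw [hm, toksOf_cons, ih []]
        have hid : (sB t).modifyHead (fun x => [] ++ x) = sB t := by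
          simpa using modifyHead_fun_id (sB t)
        rw [hid]
      · have hb : sB (a :: t) = (sB t).modifyHead (a :: ·) := by
          simp [sB, hsep]
        have ht : toksC cur (a :: t) = toksC (cur ++ [a]) t := by
          simp [toksC, hsep]
        rw [ht, ih (cur ++ [a]), hb, modifyHead_modifyHead]
        congr 2
        funext x
        simp

theorem fold_scan (cs : List Char) :
    ∀ (tks : List String) (cur : List Char),
      ((cs ++ [';']).foldl extract_top5_altStep (tks, cur)).1 = tks ++ toksC cur cs := by
  induction cs with
  | nil =>
      intro tks cur
      simp only [List.nil_append, List.foldl_cons, List.foldl_nil]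
      rw [extract_top5_altStep, if_pos (Or.inl rfl)]
      simp only [toksC]
      split_ifs <;> simp
  | cons a t ih =>
      intro tks cur
      simp only [List.cons_append, List.foldl_cons]
      by_cases hsep : a = ';' ∨ a = '|'
      · rw [extract_top5_altStep, if_pos hsep]
        rw [ih]
        simp only [toksC, if_pos hsep]
        split_ifs <;> simp
      · rw [extract_top5_altStep, if_neg hsep]
        rw [ih]
        simp [toksC, hsep]

-- A's group loop, truncated to 5, forgets the break
theorem loop_take (groups : List String) :
    ∀ acc, (extract_top5_loop groups acc).take 5
      = (acc ++ groups.flatMap (fun grp =>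
          (((PySem.Str.split? grp "|").getD []).filter
              (fun x => !(PySem.Str.strip x == ""))).map PySem.Str.strip)).take 5 := by
  induction groups with
  | nil => intro acc; simp [extract_top5_loop]
  | cons g rest ih =>
      intro acc
      simp only [extract_top5_loop, List.flatMap_cons]
      split
      · next hlen =>
          rw [← List.append_assoc, List.take_append_of_le_length hlen]
      · next hlen =>
          rw [ih]
          simp [List.append_assoc]

-- unpack the Str-level split into the Chars-level simple splitter
theorem split?_getD (s sep : String) (c : Char) (hs : sep.toList = [c]) :
    (PySem.Str.split? s sep).getD [] = (sCh c s.toList).map String.ofList := by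
  have hb := PySem.Str.split?_map s sep
  rw [hs] at hb
  have hch : PySem.Chars.split? s.toList [c] = some (sCh c s.toList) := by
    simp [PySem.Chars.split?, splitOn_single]
  rw [hch] at hb
  cases ho : PySem.Str.split? s sep with
  | none => rw [ho] at hb; simp at hb
  | some L =>
      rw [ho] at hb
      simp only [Option.map_some, Option.some.injEq] at hb
      simp only [Option.getD_some]
      rw [← hb, List.map_map,
        show (String.ofList ∘ String.toList) = id from funext fun x => String.ofList_toList,
        List.map_id]

theorem gt_eq_toksOf (g : List Char) :
    (((PySem.Str.split? (String.ofList g) "|").getD []).filter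
        (fun x => !(PySem.Str.strip x == ""))).map PySem.Str.strip
      = toksOf (sCh '|' g) := by
  rw [split?_getD (String.ofList g) "|" '|' (by decide)]
  simp [toksOf]

-- the main identity on a nonempty string's character list
theorem core (cs : List Char) :
    (extract_top5_loop ((sCh ';' cs).map String.ofList) []).take 5
      = (((cs ++ [';']).foldl extract_top5_altStep ([], [])).1).take 5 := by
  rw [fold_scan cs [] [], loop_take]
  simp only [List.nil_append]
  rw [toksC_eq cs []]
  have hid : (sB cs).modifyHead (fun x => [] ++ x) = sB cs := by
    simpa using modifyHead_fun_id (sB cs)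
  rw [hid, flatMap_map']
  have hfun : (fun g : List Char =>
      (((PySem.Str.split? (String.ofList g) "|").getD []).filter
          (fun x => !(PySem.Str.strip x == ""))).map PySem.Str.strip)
      = fun g : List Char => toksOf (sCh '|' g) := by
    funext g
    exact gt_eq_toksOf g
  rw [hfun, toksOf_flatMap, ← sB_eq_flatMap]

-- ===== VERDICT (by name: the statement is the Claim_ definition above) =====
theorem extract_top5_spec : Claim_equal_extract_top5 := by
  intro prediction _
  unfold Spec_extract_top5
  cases prediction with
  | none => rfl
  | some s =>
      simp only [extract_top5, extract_top5_alt]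
      by_cases hs : s = ""
      · simp [hs]
      · simp only [if_neg hs]
        rw [PySem.List.slice_to (extract_top5_loop ((PySem.Str.split? s ";").getD []) [])
              (show (0:Int) ≤ 5 by norm_num),
            PySem.List.slice_to (((s.toList ++ [';']).foldl extract_top5_altStep ([], [])).1)
              (show (0:Int) ≤ 5 by norm_num)]
        rw [split?_getD s ";" ';' (by decide)]
        have h5 : ((5:Int)).toNat = 5 := by decide
        rw [h5]
        exact core s.toList
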